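-- pv_equiv track=rewrite | github.com/LMCuber/BlockingdomGPUAccel | src/prim_data.py | tshow
-- ===== SOURCE A (Python) =====
-- def tshow(str_):
--     # init
--     ret = str_
--     if ret is None:
--         return ""
--     # tools
--     for tool in tinfo:
--         ret = ret.replace(f"_{tool}", f" {tool}")
--     # other
--     if "_en" in ret:
--         pass
--     return ret
--
-- tinfo = {
--     "axe":
--         {"blocks": {"wood": 0.03, "bamboo": 0.024, "coconut": 0.035, "cactus": 0.04, "barrel": 0.01, "workbench": 0.02, "wooden-planks": 0.035}},
--
--     "pickaxe":
--         {"blocks": {"snow-stone": 0.036, "stone": 0.02, "blackstone": 0.015, "grave": 0.015, "rock": 0.015}},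
--
--     "shovel":
--         {"blocks": {"soil": 0.16, "dirt": 0.06, "sand": 0.2}},
--
--     "sickle":
--         {"blocks": {"hay": 0.10}},
--
--     "scissors":
--         {"blocks": {"leaf": 0.04, "vine": 0.02}},
--
--     "sword":
--         {"blocks": {}},
--
--     "grappling-hook":
--         {"blocks": {}},
--
--     "hammer":
--         {"blocks": {}},
--
--     "bow":
--         {"blocks": {}},
--
--     "bat":
--         {"blocks": {}},
--
--     "kunai":
--         {"blocks": {}},
-- }
-- ===== SOURCE B (Python) =====
-- TOOLS = ("axe", "pickaxe", "shovel", "sickle", "scissors", "sword",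
--          "grappling-hook", "hammer", "bow", "bat", "kunai")
--
--
-- def tshow(str_):
--     if str_ is None:
--         return ""
--     s = str_
--     out = []
--     for i, c in enumerate(s):
--         if c == "_" and any(s.startswith(t, i + 1) for t in TOOLS):
--             out.append(" ")
--         else:
--             out.append(c)
--     return "".join(out)
-- ===== Notes on version B (the rewrite author's own statement) =====
-- stated objective: alternative
-- what changed: B makes one left-to-right scan over the string, turning each underscore that is directly followed by a tool name into a space, instead of A's eleven sequential str.replace passes; A's dead membership check is dropped.
import Mathlib
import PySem

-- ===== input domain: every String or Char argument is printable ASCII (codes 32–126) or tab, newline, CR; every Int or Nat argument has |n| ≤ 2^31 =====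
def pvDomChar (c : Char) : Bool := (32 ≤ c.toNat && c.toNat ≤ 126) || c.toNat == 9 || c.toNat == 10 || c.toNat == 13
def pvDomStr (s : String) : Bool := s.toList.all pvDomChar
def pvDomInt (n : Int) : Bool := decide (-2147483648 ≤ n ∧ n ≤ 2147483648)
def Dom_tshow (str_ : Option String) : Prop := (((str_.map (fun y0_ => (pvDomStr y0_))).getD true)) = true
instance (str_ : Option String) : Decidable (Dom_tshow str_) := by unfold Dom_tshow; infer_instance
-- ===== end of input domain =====

-- B replaces A's eleven sequential str.replace passes by one left-to-right scan that
-- turns each underscore directly followed by a tool name into a space (alternative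
-- decomposition, same asymptotic cost; A's dead membership check is dropped).

-- the keys of the module-level `tinfo` dict, in insertion order (shared module data)
def toolNames : List String :=
  ["axe", "pickaxe", "shovel", "sickle", "scissors", "sword",
   "grappling-hook", "hammer", "bow", "bat", "kunai"]

-- ===== PORT A =====
-- ret = str_; if None return ""; for tool in tinfo: ret = ret.replace("_"+tool, " "+tool);
-- the dead if-branch (its body is pass) computes a membership test and does nothing: ported as a discarded let.
def tshow (str_ : Option String) : String :=
  match str_ with
  | none => ""
  | some s =>
    let ret := List.foldl
      (fun ret tool => PySem.Str.replace ret ("_" ++ tool) (" " ++ tool)) s toolNames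
    let _ := PySem.Str.isIn "_en" ret
    ret

-- ===== PORT B =====
-- Source B: one pass over the characters; an underscore followed (as s.startswith(t, i+1)) by
-- some tool name becomes a space, every other character is copied.
def tshowGo (s : List Char) : List Char :=
  match s with
  | [] => []
  | c :: t =>
    (if c == '_' && toolNames.any (fun tool => PySem.Chars.startswith t tool.toList)
     then ' ' else c) :: tshowGo t

def tshow_alt (str_ : Option String) : String :=
  match str_ with
  | none => ""
  | some s => String.ofList (tshowGo s.toList)

-- ===== PRECONDITION & SPEC =====
def Spec_tshow (str_ : Option String) (out : String) : Prop := out = tshow_alt str_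
instance (str_ : Option String) (out : String) : Decidable (Spec_tshow str_ out) := by unfold Spec_tshow; infer_instance

-- ===== CLAIM (what is proved, stated in full; the proofs are below) =====
def Claim_equal_tshow : Prop := ∀ (str_ : Option String), Dom_tshow str_ → Spec_tshow str_ (tshow str_)

-- ===== LEMMAS AND PROOFS =====

-- generic one-pass scanner: replace each '_' whose tail satisfies P by ' '
def scanP (P : List Char → Bool) : List Char → List Char
  | [] => []
  | c :: t => (if c == '_' && P t then ' ' else c) :: scanP P t

lemma scanP_congr (P Q : List Char → Bool) (h : ∀ t, P t = Q t) :
    ∀ s, scanP P s = scanP Q s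
  | [] => rfl
  | c :: t => by simp [scanP, h t, scanP_congr P Q h t]

lemma scanP_false (s : List Char) : scanP (fun _ => false) s = s := by
  induction s with
  | nil => rfl
  | cons c t ih => simp [scanP, ih]

lemma tshowGo_eq_scanP (s : List Char) :
    tshowGo s
      = scanP (fun t => toolNames.any (fun tool => PySem.Chars.startswith t tool.toList)) s := by
  induction s with
  | nil => rfl
  | cons c t ih => simp [tshowGo, scanP, ih]

-- a block of non-'_' characters passes through any scan unchanged
lemma scanP_append_no_underscore (P : List Char → Bool) (u : List Char)
    (hu : ∀ c ∈ u, c ≠ '_') (r : List Char) :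
    scanP P (u ++ r) = u ++ scanP P r := by
  induction u with
  | nil => rfl
  | cons c u ih =>
    have hc : c ≠ '_' := hu c (List.mem_cons_self ..)
    simp [scanP, hc, ih (fun d hd => hu d (List.mem_cons_of_mem _ hd))]

-- a scan changes only '_' into ' ', so prefix tests for words free of both are invariant
lemma isPrefixOf_scanP (P : List Char → Bool) (t : List Char) :
    ∀ tl : List Char, (∀ c ∈ tl, c ≠ '_' ∧ c ≠ ' ') →
      tl.isPrefixOf (scanP P t) = tl.isPrefixOf t := by
  induction t with
  | nil => intro tl _; rfl
  | cons c t ih =>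
    intro tl htl
    cases tl with
    | nil => rfl
    | cons d tl' =>
      have hd := htl d (List.mem_cons_self ..)
      have ih' := ih tl' (fun e he => htl e (List.mem_cons_of_mem _ he))
      simp only [scanP, List.isPrefixOf, ih']
      congr 1
      by_cases h : (c == '_' && P t) = true
      · have hc : c = '_' := beq_iff_eq.mp (Bool.and_eq_true_iff.mp h).1
        rw [if_pos h]
        subst hc
        have h1 : (d == ' ') = false := beq_eq_false_iff_ne.mpr hd.2
        have h2 : (d == '_') = false := beq_eq_false_iff_ne.mpr hd.1
        rw [h1, h2]
      · rw [if_neg h]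

lemma replace_go_eq (tl : List Char) (hun : ∀ c ∈ tl, c ≠ '_') (fuel : Nat) :
    ∀ (l acc : List Char), l.length ≤ fuel →
      PySem.Chars.replace.go ('_' :: tl) (' ' :: tl) fuel l acc
        = acc.reverse ++ scanP (fun t => tl.isPrefixOf t) l := by
  induction fuel with
  | zero =>
    intro l acc h
    have hl : l = [] := by cases l <;> simp_all
    subst hl
    simp [PySem.Chars.replace.go, scanP]
  | succ f ih =>
    intro l acc h
    cases l with
    | nil => simp [PySem.Chars.replace.go, scanP]
    | cons c t =>
      by_cases hp : ('_' :: tl).isPrefixOf (c :: t)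
      · obtain ⟨t', ht'⟩ := List.isPrefixOf_iff_prefix.mp hp
        have hc : c = '_' := by
          have := ht'
          simp only [List.cons_append, List.cons.injEq] at this
          exact this.1.symm
        have htt : t = tl ++ t' := by
          have := ht'
          simp only [List.cons_append, List.cons.injEq] at this
          exact this.2.symm
        subst hc htt
        have hlen : t'.length ≤ f := by
          simp [List.length_append] at h
          omega
        simp only [PySem.Chars.replace.go, hp, if_true]
        have hdrop : List.drop ('_' :: tl).length ('_' :: (tl ++ t')) = t' := by
          simp
        rw [hdrop, ih t' _ hlen]
        have hpref : tl.isPrefixOf (tl ++ t') = true :=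
          List.isPrefixOf_iff_prefix.mpr (List.prefix_append tl t')
        simp [scanP, hpref, scanP_append_no_underscore _ tl hun t']
      · simp only [PySem.Chars.replace.go, hp, if_false, Bool.false_eq_true]
        rw [ih t (c :: acc) (by simpa using Nat.le_of_succ_le_succ (by simpa using h))]
        have hcond : (c == '_' && tl.isPrefixOf t) = false := by
          simp only [List.isPrefixOf] at hp
          by_cases hc : c = '_'
          · subst hc
            simp only [beq_self_eq_true, Bool.true_and] at hp
            rw [Bool.not_eq_true] at hp
            simp [hp]
          · have : (c == '_') = false := beq_eq_false_iff_ne.mpr hc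
            simp [this]
        simp [scanP, hcond]

lemma replace_eq_scanP (tl : List Char) (hun : ∀ c ∈ tl, c ≠ '_') (s : List Char) :
    PySem.Chars.replace s ('_' :: tl) (' ' :: tl)
      = scanP (fun t => tl.isPrefixOf t) s := by
  rw [PySem.Chars.replace]
  simp only [List.isEmpty_cons, Bool.false_eq_true, if_false]
  simpa using replace_go_eq tl hun s.length s [] (le_refl _)

lemma scanP_comp (P Q : List Char → Bool) (hQ : ∀ t, Q (scanP P t) = Q t) :
    ∀ s, scanP Q (scanP P s) = scanP (fun t => P t || Q t) s := by
  intro s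
  induction s with
  | nil => rfl
  | cons c t ih =>
    simp only [scanP, hQ, ih]
    congr 1
    by_cases hc : c = '_' <;> by_cases hP : P t <;> by_cases hq : Q t <;>
      simp [hc, hP, hq]

lemma any_isPrefixOf_scanP (P : List Char → Bool) (tls : List (List Char))
    (h : ∀ tl ∈ tls, ∀ c ∈ tl, c ≠ '_' ∧ c ≠ ' ') (t : List Char) :
    tls.any (fun tl => tl.isPrefixOf (scanP P t)) = tls.any (fun tl => tl.isPrefixOf t) := by
  induction tls with
  | nil => rfl
  | cons tl rest ih =>
    simp only [List.any_cons]
    rw [isPrefixOf_scanP P t tl (h tl (List.mem_cons_self ..)),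
        ih (fun u hu => h u (List.mem_cons_of_mem _ hu))]

lemma foldl_replace_eq (tls : List (List Char))
    (h : ∀ tl ∈ tls, ∀ c ∈ tl, c ≠ '_' ∧ c ≠ ' ') :
    ∀ s : List Char,
      List.foldl (fun l tl => PySem.Chars.replace l ('_' :: tl) (' ' :: tl)) s tls
        = scanP (fun t => tls.any (fun tl => tl.isPrefixOf t)) s := by
  induction tls with
  | nil => intro s; simpa using (scanP_false s).symm
  | cons tl rest ih =>
    intro s
    have h1 : ∀ c ∈ tl, c ≠ '_' ∧ c ≠ ' ' := h tl (List.mem_cons_self ..)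
    have hrest : ∀ u ∈ rest, ∀ c ∈ u, c ≠ '_' ∧ c ≠ ' ' :=
      fun u hu => h u (List.mem_cons_of_mem _ hu)
    rw [List.foldl_cons, ih hrest, replace_eq_scanP tl (fun c hc => (h1 c hc).1),
        scanP_comp _ _ (any_isPrefixOf_scanP _ rest hrest)]
    exact scanP_congr _ _ (fun t => by simp [List.any_cons]) s

lemma replace_toList (s tool : String) :
    (PySem.Str.replace s ("_" ++ tool) (" " ++ tool)).toList
      = PySem.Chars.replace s.toList ('_' :: tool.toList) (' ' :: tool.toList) := by
  have h1 : ("_" ++ tool).toList = '_' :: tool.toList := by simp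
  have h2 : (" " ++ tool).toList = ' ' :: tool.toList := by simp
  rw [PySem.Str.toList_replace, h1, h2]

lemma foldl_str_toList (tls : List String) :
    ∀ s : String,
      (List.foldl (fun ret tool => PySem.Str.replace ret ("_" ++ tool) (" " ++ tool)) s tls).toList
        = List.foldl (fun l tl => PySem.Chars.replace l ('_' :: tl) (' ' :: tl))
            s.toList (tls.map String.toList) := by
  induction tls with
  | nil => intro s; rfl
  | cons tool rest ih =>
    intro s
    simp only [List.foldl_cons, List.map_cons]
    rw [ih, replace_toList]

-- ===== VERDICT (by name: the statement is the Claim_ definition above) =====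
theorem tshow_spec : Claim_equal_tshow := by
  intro str_ _
  unfold Spec_tshow
  cases str_ with
  | none => rfl
  | some s =>
    have hgood : ∀ tl ∈ toolNames.map String.toList, ∀ c ∈ tl, c ≠ '_' ∧ c ≠ ' ' := by
      intro tl htl
      fin_cases htl <;> simp
    have h1 : (tshow (some s)).toList = tshowGo s.toList := by
      simp only [tshow]
      rw [foldl_str_toList toolNames s, foldl_replace_eq _ hgood, tshowGo_eq_scanP]
      exact scanP_congr _ _
        (fun t => by simp [List.any_map, PySem.Chars.startswith, Function.comp_def]) _
    have h2 : tshow (some s) = String.ofList (tshow (some s)).toList := by simp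
    rw [h2, h1]
    rfl
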